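-- pv_equiv track=rewrite | github.com/razvan/aoc | 2023/python/day13/part1.py | _mirror_index
-- ===== SOURCE A (Python) =====
-- from typing import List
--
-- def _mirror_index(input: List[str]) -> int | None:
--     if len(input) < 2:
--         return None
--     for i in range(1, len(input)):
--         if input[i - 1] == input[i]:
--             # possible mirror found
--             left = reversed(input[:i])
--             right = input[i:]
--             if all(map(lambda t: t[0] == t[1], zip(left, right))):
--                 return i
--
--     return None
-- ===== SOURCE B (Python) =====
-- def _mirror_index(input):
--     # Exact bit-packing: intern rows to int ids, pack the id sequence into two
--     # big ints (forward and reversed, in base 2**k with 2**k > every id, so the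
--     # packing is collision-free), then test each mirror candidate with a single
--     # shift-and-mask comparison instead of comparing slices.
--     ids = {}
--     xs = []
--     for row in input:
--         v = ids.get(row)
--         if v is None:
--             v = len(ids)
--             ids[row] = v
--         xs.append(v)
--     n = len(xs)
--     k = len(ids).bit_length()
--     fwd = 0
--     rev = 0
--     for j in range(n):
--         fwd += xs[j] << (k * j)
--         rev += xs[j] << (k * (n - 1 - j))
--     for i in range(1, n):
--         m = min(i, n - i)
--         if (rev >> (k * (n - i))) & ((1 << (k * m)) - 1) == (fwd >> (k * i)) & ((1 << (k * m)) - 1):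
--             return i
--     return None
-- ===== Notes on version B (the rewrite author's own statement) =====
-- stated objective: alternative
-- what changed: B interns rows to int ids, packs the id sequence into two big ints (forward and reversed prefix packings in a power-of-two base larger than every id, so collision-free), and decides each mirror candidate with one shift-and-compare of precomputed packing differences, instead of A's per-candidate reversed-slice vs suffix comparison.
import Mathlib
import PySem

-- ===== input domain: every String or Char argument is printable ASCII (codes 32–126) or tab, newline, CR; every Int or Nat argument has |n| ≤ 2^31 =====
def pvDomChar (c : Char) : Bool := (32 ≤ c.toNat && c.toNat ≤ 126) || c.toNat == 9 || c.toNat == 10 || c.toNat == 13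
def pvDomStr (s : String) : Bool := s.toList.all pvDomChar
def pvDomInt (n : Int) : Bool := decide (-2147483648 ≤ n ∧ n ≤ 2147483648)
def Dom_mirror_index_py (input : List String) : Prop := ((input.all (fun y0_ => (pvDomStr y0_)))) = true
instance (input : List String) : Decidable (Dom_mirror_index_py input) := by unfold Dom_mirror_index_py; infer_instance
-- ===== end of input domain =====

-- B replaces A's per-candidate slice comparison by exact bit-packing of interned row ids
-- (forward/reversed prefix packings in base 2^k > every id), one shift-and-compare per candidate.

-- ===== PORT A =====
def mirrorLoopA (input : List String) : List Int → Option Int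
  | [] => none
  | i :: rest =>
    if PySem.List.pyGetD input (i - 1) "" == PySem.List.pyGetD input i "" then
      -- possible mirror found
      let left := (PySem.List.slice input none (some i)).reverse
      let right := PySem.List.slice input (some i) none
      if (((left.zip right).map (fun t => t.1 == t.2)).all id) then some i
      else mirrorLoopA input rest
    else mirrorLoopA input rest

def mirror_index_py (input : List String) : Option Int :=
  if input.length < 2 then none
  else mirrorLoopA input (PySem.List.pyRange 1 (input.length : Int) 1)

-- ===== PORT B =====
-- interning loop: 'v = ids.get(row); if v is None: v = len(ids); ids[row] = v; xs.append(v)'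
def internStep (st : PySem.Dict String Int × List Int) (row : String) :
    PySem.Dict String Int × List Int :=
  match st.1.get? row with
  | some v => (st.1, st.2 ++ [v])
  | none => (st.1.insert row (st.1.size : Int), st.2 ++ [(st.1.size : Int)])

-- 'a << s' / 'a >> s': exact for the nonnegative shift counts B uses (s = k*j with k, j ≥ 0)
def pyShl (a s : Int) : Int := a * 2 ^ s.toNat
def pyShr (a s : Int) : Int := PySem.Int.floordiv a (2 ^ s.toNat)

-- 'a & msk' where msk + 1 is a power of two: equals a mod (msk + 1) for every int
-- (Python's & uses two's complement with infinite sign extension)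
def pyAndMask (a msk : Int) : Int := PySem.Int.mod a (msk + 1)

-- 'fwd += xs[j] << (k*j); rev += xs[j] << (k*(n-1-j))'
def packStep (xs : List Int) (k n : Int) (st : Int × Int) (j : Int) : Int × Int :=
  (st.1 + pyShl (PySem.List.pyGetD xs j 0) (k * j),
   st.2 + pyShl (PySem.List.pyGetD xs j 0) (k * (n - 1 - j)))

-- candidate loop: one shift-and-mask comparison per i
def mirrorLoopB (n k fwd rev : Int) : List Int → Option Int
  | [] => none
  | i :: rest =>
    let m := min i (n - i)
    if pyAndMask (pyShr rev (k * (n - i))) (pyShl 1 (k * m) - 1) ==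
        pyAndMask (pyShr fwd (k * i)) (pyShl 1 (k * m) - 1)
    then some i else mirrorLoopB n k fwd rev rest

def mirror_index_py_alt (input : List String) : Option Int :=
  let st := input.foldl internStep (PySem.Dict.empty, [])
  let xs := st.2
  let n : Int := (xs.length : Int)
  let k : Int := (PySem.Int.bitLength (st.1.size : Int) : Int)
  let p := (PySem.List.pyRange 0 n 1).foldl (packStep xs k n) (0, 0)
  mirrorLoopB n k p.1 p.2 (PySem.List.pyRange 1 n 1)

-- ===== PRECONDITION & SPEC =====
def Spec_mirror_index_py (input : List String) (out : Option Int) : Prop := out = mirror_index_py_alt input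
instance (input : List String) (out : Option Int) : Decidable (Spec_mirror_index_py input out) := by unfold Spec_mirror_index_py; infer_instance

-- ===== CLAIM (what is proved, stated in full; the proofs are below) =====
def Claim_equal_mirror_index_py : Prop := ∀ (input : List String), Dom_mirror_index_py input → Spec_mirror_index_py input (mirror_index_py input)

-- ===== LEMMAS AND PROOFS =====

-- boolean condition of A's loop body, named for the proofs
def condA (input : List String) (i : Int) : Bool :=
  (PySem.List.pyGetD input (i - 1) "" == PySem.List.pyGetD input i "") &&
  ((((PySem.List.slice input none (some i)).reverse.zip
      (PySem.List.slice input (some i) none)).map (fun t => t.1 == t.2)).all id)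

-- boolean condition of B's loop body
def condB (n k fwd rev : Int) (i : Int) : Bool :=
  pyAndMask (pyShr rev (k * (n - i))) (pyShl 1 (k * min i (n - i)) - 1) ==
    pyAndMask (pyShr fwd (k * i)) (pyShl 1 (k * min i (n - i)) - 1)

lemma mirrorLoopA_cons (input : List String) (i : Int) (rest : List Int) :
    mirrorLoopA input (i :: rest) =
      if condA input i then some i else mirrorLoopA input rest := by
  cases hg : (PySem.List.pyGetD input (i - 1) "" == PySem.List.pyGetD input i "") <;>
    simp only [mirrorLoopA, condA, hg, Bool.true_and, Bool.false_and, if_neg Bool.false_ne_true, if_pos trivial]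

lemma mirrorLoopB_cons (n k fwd rev : Int) (i : Int) (rest : List Int) :
    mirrorLoopB n k fwd rev (i :: rest) =
      if condB n k fwd rev i then some i else mirrorLoopB n k fwd rev rest := by
  simp [mirrorLoopB, condB]

lemma loops_eq (input : List String) (n k fwd rev : Int) :
    ∀ (r : List Int), (∀ i ∈ r, condA input i = condB n k fwd rev i) →
      mirrorLoopA input r = mirrorLoopB n k fwd rev r := by
  intro r
  induction r with
  | nil => intro _; rfl
  | cons i rest ih =>
    intro h
    rw [mirrorLoopA_cons, mirrorLoopB_cons, h i (by simp), ih (fun j hj => h j (by simp [hj]))]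

-- interning invariant: the fold builds an injective, bounded dict and the id list it maps input through
lemma intern_go : ∀ (l : List String) (d : PySem.Dict String Int) (acc : List Int),
    d.keys.Nodup →
    (∀ s v, d.get? s = some v → 0 ≤ v ∧ v < (d.size : Int)) →
    (∀ s t v, d.get? s = some v → d.get? t = some v → s = t) →
    ∃ ext : List Int,
      (l.foldl internStep (d, acc)).2 = acc ++ ext ∧
      ext.length = l.length ∧
      (∀ k (hk : k < l.length) (hk' : k < ext.length),
        (l.foldl internStep (d, acc)).1.get? (l[k]'hk) = some (ext[k]'hk')) ∧
      (∀ s v, d.get? s = some v → (l.foldl internStep (d, acc)).1.get? s = some v) ∧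
      (∀ s t v, (l.foldl internStep (d, acc)).1.get? s = some v →
        (l.foldl internStep (d, acc)).1.get? t = some v → s = t) ∧
      (∀ s v, (l.foldl internStep (d, acc)).1.get? s = some v →
        0 ≤ v ∧ v < ((l.foldl internStep (d, acc)).1.size : Int)) := by
  intro l
  induction l with
  | nil =>
    intro d acc hnd hbd hinj
    exact ⟨[], by simp, rfl, (fun k hk _ => absurd hk (by simp)), fun s v h => h, hinj, hbd⟩
  | cons row rest ih =>
    intro d acc hnd hbd hinj
    cases hrow : d.get? row with
    | some v =>
      have hstep : internStep (d, acc) row = (d, acc ++ [v]) := by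
        simp [internStep, hrow]
      simp only [List.foldl_cons, hstep]
      obtain ⟨ext, he, hl, hget, hmono, hinj', hbd'⟩ := ih d (acc ++ [v]) hnd hbd hinj
      refine ⟨v :: ext, by simp [he], by simpa using hl, ?_, hmono, hinj', hbd'⟩
      intro k hk hk'
      cases k with
      | zero => simpa using hmono row v hrow
      | succ k => simpa using hget k (by simpa using hk) (by simpa using hk')
    | none =>
      set d1 := d.insert row (d.size : Int) with hd1
      have hstep : internStep (d, acc) row = (d1, acc ++ [(d.size : Int)]) := by
        simp [internStep, hrow, hd1]
      simp only [List.foldl_cons, hstep]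
      have hsz : d1.size = d.size + 1 := by
        rw [hd1, PySem.Dict.size_insert]
        simp [PySem.Dict.contains_eq_isSome_get?, hrow]
      have hget1 : ∀ s, d1.get? s = if s = row then some (d.size : Int) else d.get? s := by
        intro s
        rw [hd1, PySem.Dict.get?_insert]
      have hnd1 : d1.keys.Nodup := PySem.Dict.nodup_keys_insert _ _ _ hnd
      have hbd1 : ∀ s v, d1.get? s = some v → 0 ≤ v ∧ v < (d1.size : Int) := by
        intro s v h
        rw [hget1] at h
        rw [hsz]
        split at h
        · injection h with hv
          subst hv
          constructor
          · positivity
          · push_cast; omega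
        · have := hbd s v h
          push_cast
          omega
      have hinj1 : ∀ s t v, d1.get? s = some v → d1.get? t = some v → s = t := by
        intro s t v hs ht
        rw [hget1] at hs ht
        by_cases h1 : s = row <;> by_cases h2 : t = row
        · rw [h1, h2]
        · exfalso
          rw [if_pos h1] at hs
          rw [if_neg h2] at ht
          injection hs with hv
          have := (hbd t v ht).2
          omega
        · exfalso
          rw [if_neg h1] at hs
          rw [if_pos h2] at ht
          injection ht with hv
          have := (hbd s v hs).2
          omega
        · rw [if_neg h1] at hs
          rw [if_neg h2] at ht
          exact hinj s t v hs ht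
      have hmono1 : ∀ s v, d.get? s = some v → d1.get? s = some v := by
        intro s v h
        rw [hget1]
        split
        · subst_vars; rw [hrow] at h; cases h
        · exact h
      obtain ⟨ext, he, hl, hget, hmono, hinj', hbd'⟩ :=
        ih d1 (acc ++ [(d.size : Int)]) hnd1 hbd1 hinj1
      refine ⟨(d.size : Int) :: ext, by simp [he], by simpa using hl, ?_,
        fun s v h => hmono s v (hmono1 s v h), hinj', hbd'⟩
      intro k hk hk'
      cases k with
      | zero =>
        have : d1.get? row = some (d.size : Int) := by rw [hget1]; simp
        simpa using hmono row _ this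
      | succ k => simpa using hget k (by simpa using hk) (by simpa using hk')

-- the id list of the interning fold, named for the proofs
def internB (input : List String) : List Int :=
  (input.foldl internStep (PySem.Dict.empty, [])).2

def internSize (input : List String) : Int :=
  ((input.foldl internStep (PySem.Dict.empty, [])).1.size : Int)

-- internB: length preserved, id-equality coincides with row-equality, ids bounded by the dict size
lemma internB_spec (input : List String) :
    (internB input).length = input.length ∧
    (∀ a b (ha : a < input.length) (hb : b < input.length)
      (ha' : a < (internB input).length) (hb' : b < (internB input).length),
      ((internB input)[a]'ha' = (internB input)[b]'hb' ↔ input[a]'ha = input[b]'hb)) ∧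
    (∀ v ∈ internB input, 0 ≤ v ∧ v < internSize input) := by
  obtain ⟨ext, he, hl, hget, -, hinj, hbd⟩ := intern_go input PySem.Dict.empty []
    (by simp) (by intro s v h; simp at h) (by intro s t v h; simp at h)
  have hB : internB input = ext := by simpa [internB] using he
  refine ⟨by rw [hB, hl], ?_, ?_⟩
  · intro a b ha hb ha' hb'
    have ha2 : a < ext.length := by omega
    have hb2 : b < ext.length := by omega
    have h1 := hget a ha ha2
    have h2 := hget b hb hb2
    constructor
    · intro h
      simp only [hB] at h
      rw [h] at h1
      exact hinj _ _ _ h1 h2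
    · intro h
      rw [h] at h1
      rw [h1] at h2
      injection h2 with h2
      simp only [hB]
      exact h2
  · intro v hv
    rw [hB] at hv
    obtain ⟨k, hk, rfl⟩ := List.mem_iff_getElem.mp hv
    have hk2 : k < input.length := by omega
    exact hbd _ _ (hget k hk2 hk)

-- positional big-int digit representation is injective (digits in [0, b))
lemma digits_inj (b : Int) : ∀ (m : ℕ) (a c : ℕ → Int),
    (∀ k, k < m → 0 ≤ a k ∧ a k < b) → (∀ k, k < m → 0 ≤ c k ∧ c k < b) →
    (∑ k ∈ Finset.range m, a k * b ^ k) = (∑ k ∈ Finset.range m, c k * b ^ k) →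
    ∀ k, k < m → a k = c k := by
  intro m
  induction m with
  | zero => intro a c _ _ _ k hk; omega
  | succ m ih =>
    intro a c hA hC hsum k hk
    have hb : 0 < b := by have := hA 0 (by omega); omega
    have hre : ∀ (f : ℕ → Int), ∑ j ∈ Finset.range (m + 1), f j * b ^ j =
        f 0 + b * ∑ j ∈ Finset.range m, f (j + 1) * b ^ j := by
      intro f
      rw [Finset.sum_range_succ' (fun j => f j * b ^ j) m, Finset.mul_sum]
      simp only [pow_succ, pow_zero, mul_one]
      rw [add_comm]
      congr 1
      refine Finset.sum_congr rfl ?_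
      intro x _
      ring
    rw [hre a, hre c] at hsum
    have hSa : 0 ≤ ∑ j ∈ Finset.range m, a (j + 1) * b ^ j :=
      Finset.sum_nonneg (fun j hj => mul_nonneg (hA (j + 1) (by simp at hj; omega)).1 (by positivity))
    have hSc : 0 ≤ ∑ j ∈ Finset.range m, c (j + 1) * b ^ j :=
      Finset.sum_nonneg (fun j hj => mul_nonneg (hC (j + 1) (by simp at hj; omega)).1 (by positivity))
    have h0 : a 0 = c 0 := by
      have hma : (a 0 + b * ∑ j ∈ Finset.range m, a (j + 1) * b ^ j) % b = a 0 := by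
        rw [Int.add_mul_emod_self_left]
        exact Int.emod_eq_of_lt (hA 0 (by omega)).1 (hA 0 (by omega)).2
      have hmc : (c 0 + b * ∑ j ∈ Finset.range m, c (j + 1) * b ^ j) % b = c 0 := by
        rw [Int.add_mul_emod_self_left]
        exact Int.emod_eq_of_lt (hC 0 (by omega)).1 (hC 0 (by omega)).2
      rw [← hma, ← hmc, hsum]
    have htails : (∑ j ∈ Finset.range m, a (j + 1) * b ^ j) =
        ∑ j ∈ Finset.range m, c (j + 1) * b ^ j := by
      have : b * ∑ j ∈ Finset.range m, a (j + 1) * b ^ j =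
          b * ∑ j ∈ Finset.range m, c (j + 1) * b ^ j := by omega
      exact mul_left_cancel₀ (by omega) this
    cases k with
    | zero => exact h0
    | succ k =>
      exact ih (fun j => a (j + 1)) (fun j => c (j + 1))
        (fun j hj => hA (j + 1) (by omega)) (fun j hj => hC (j + 1) (by omega)) htails k (by omega)

-- characterization of the packing loop: polynomial sums in base 2^k
lemma pack_char (xs : List Int) (k : ℕ) (n : ℕ) :
    ∀ m, m ≤ n →
    (PySem.List.pyRange 0 (m : Int) 1).foldl (packStep xs (k : Int) (n : Int)) (0, 0) =
      (∑ j ∈ Finset.range m, xs.getD j 0 * ((2 : Int) ^ k) ^ j,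
       ∑ j ∈ Finset.range m, xs.getD j 0 * ((2 : Int) ^ k) ^ (n - 1 - j)) := by
  intro m
  induction m with
  | zero => intro _; simp [PySem.List.pyRange_one_eq_nil (by omega : (0 : Int) ≤ 0)]
  | succ m ih =>
    intro hm
    have hc : ((m + 1 : ℕ) : Int) = (m : Int) + 1 := by push_cast; ring
    rw [hc, PySem.List.pyRange_one_succ_right (by positivity), List.foldl_append,
      ih (by omega)]
    simp only [List.foldl_cons, List.foldl_nil, packStep]
    have hxs : PySem.List.pyGetD xs (m : Int) 0 = xs.getD m 0 := PySem.List.pyGetD_natCast _ _ _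
    have hshl : ∀ (a : Int) (t : ℕ), pyShl a ((k : Int) * (t : ℕ)) = a * ((2 : Int) ^ k) ^ t := by
      intro a t
      unfold pyShl
      rw [show ((k : Int) * (t : ℕ)) = ((k * t : ℕ) : Int) by push_cast; ring,
        Int.toNat_natCast, pow_mul]
    have hcast : (n : Int) - 1 - (m : Int) = ((n - 1 - m : ℕ) : Int) := by push_cast; omega
    rw [hxs, hcast, hshl, hshl, Prod.mk.injEq]
    constructor <;> simp [Finset.sum_range_succ]

-- a digit-bounded polynomial sum lies in [0, B^m)
lemma digits_bound (B : Int) (m : ℕ) (d : ℕ → Int)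
    (hB : 0 < B) (hd : ∀ t, t < m → 0 ≤ d t ∧ d t < B) :
    0 ≤ ∑ t ∈ Finset.range m, d t * B ^ t ∧ (∑ t ∈ Finset.range m, d t * B ^ t) < B ^ m := by
  induction m with
  | zero => simp
  | succ m ih =>
    obtain ⟨h0, h1⟩ := ih (fun t ht => hd t (by omega))
    rw [Finset.sum_range_succ]
    constructor
    · have := (hd m (by omega)).1
      positivity
    · have h2 := (hd m (by omega)).2
      have h3 : d m * B ^ m ≤ (B - 1) * B ^ m := by
        have : (0 : Int) < B ^ m := by positivity
        nlinarith
      have h4 : (B - 1) * B ^ m + B ^ m = B ^ (m + 1) := by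
        rw [pow_succ]
        ring
      omega

lemma zipAll_iff {α : Type} [BEq α] [LawfulBEq α] (as bs : List α) :
    (((as.zip bs).map (fun t => t.1 == t.2)).all id = true) ↔
      ∀ k (h1 : k < as.length) (h2 : k < bs.length), as[k] = bs[k] := by
  simp only [List.all_eq_true, List.mem_iff_getElem, List.getElem_map, List.length_map, id_eq,
    forall_exists_index]
  constructor
  · intro h k h1 h2
    have := h _ k (by simp [List.length_zip]; omega) rfl
    simpa [List.getElem_zip] using this
  · rintro h x k hk rfl
    have hk' := hk
    simp only [List.length_zip] at hk'
    simp only [List.getElem_zip, beq_iff_eq]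
    exact h k (by omega) (by omega)

lemma condA_iff (input : List String) (i : Nat) (h1 : 1 ≤ i) (h2 : i < input.length) :
    condA input (i : Int) = true ↔
      ∀ k (hk : k < min i (input.length - i)),
        input[i - 1 - k]'(by omega) = input[i + k]'(by omega) := by
  unfold condA
  have hcast : ((i : Int) - 1) = (((i - 1 : Nat) : Nat) : Int) := by omega
  rw [hcast, PySem.List.pyGetD_natCast, PySem.List.pyGetD_natCast,
    PySem.List.slice_to_natCast, PySem.List.slice_from_natCast,
    Bool.and_eq_true, zipAll_iff]
  rw [List.getD_eq_getElem input "" (by omega : i - 1 < input.length),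
      List.getD_eq_getElem input "" (by omega : i < input.length)]
  simp only [beq_iff_eq]
  constructor
  · rintro ⟨hg, hz⟩ k hk
    rcases Nat.eq_zero_or_pos k with rfl | hkpos
    · simpa using hg
    · have := hz k (by simp; omega) (by simp; omega)
      rw [List.getElem_reverse, List.getElem_take, List.getElem_drop] at this
      convert this using 2 <;> (try simp) <;> (try omega)
  · intro h
    have hmin : 0 < min i (input.length - i) := by omega
    refine ⟨by simpa using h 0 hmin, ?_⟩
    intro k hkA hkB
    simp only [List.length_reverse, List.length_take, List.length_drop] at hkA hkB
    rw [List.getElem_reverse, List.getElem_take, List.getElem_drop]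
    have := h k (by omega)
    convert this using 2 <;> (try simp) <;> (try omega)

-- the shift-and-mask check of B is exactly pointwise equality of the id list around the split
lemma condB_iff (xs : List Int) (k : ℕ)
    (hbd : ∀ v ∈ xs, 0 ≤ v ∧ v < (2 : Int) ^ k) (n : ℕ) (hn : xs.length = n)
    (i : ℕ) (h1 : 1 ≤ i) (h2 : i < n) :
    condB (n : Int) (k : Int)
      (∑ j ∈ Finset.range n, xs.getD j 0 * ((2 : Int) ^ k) ^ j)
      (∑ j ∈ Finset.range n, xs.getD j 0 * ((2 : Int) ^ k) ^ (n - 1 - j))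
      (i : Int) = true ↔
    ∀ t, t < min i (n - i) → xs.getD (i - 1 - t) 0 = xs.getD (i + t) 0 := by
  set base : Int := (2 : Int) ^ k with hbase
  have hb0 : 0 < base := by positivity
  set m := min i (n - i) with hm
  have hm1 : m ≤ i := by omega
  have hm2 : i + m ≤ n := by omega
  set d : ℕ → Int := fun j => xs.getD j 0 with hd
  have hdig : ∀ j, j < n → 0 ≤ d j ∧ d j < base := by
    intro j hj
    rw [hd]
    show 0 ≤ xs.getD j 0 ∧ xs.getD j 0 < base
    rw [List.getD_eq_getElem xs 0 (by omega : j < xs.length)]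
    exact hbd _ (List.getElem_mem _)
  have hpow : ∀ (s : ℕ), ((k : Int) * (s : ℕ)).toNat = k * s := by
    intro s
    rw [show ((k : Int) * (s : ℕ)) = ((k * s : ℕ) : Int) by push_cast; ring, Int.toNat_natCast]
  have hmi : min ((i : ℕ) : Int) ((n : Int) - (i : ℕ)) = ((m : ℕ) : Int) := by omega
  have hc3 : (n : Int) - ((i : ℕ) : Int) = (((n - i : ℕ) : ℕ) : Int) := by omega
  -- generic window extraction out of a packing x = Lo + B^a * (S + B^m * T)
  have hextract : ∀ (x Lo S T : Int) (a : ℕ),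
      x = Lo + base ^ a * (S + base ^ m * T) → 0 ≤ Lo → Lo < base ^ a → 0 ≤ S → S < base ^ m →
      pyAndMask (pyShr x ((k : Int) * ((a : ℕ) : Int))) (pyShl 1 ((k : Int) * ((m : ℕ) : Int)) - 1) = S := by
    intro x Lo S T a hx hLo1 hLo2 hS1 hS2
    unfold pyAndMask pyShr pyShl
    rw [hpow, hpow]
    have h2a : (2 : Int) ^ (k * a) = base ^ a := by rw [hbase, ← pow_mul]
    have h2m : (2 : Int) ^ (k * m) = base ^ m := by rw [hbase, ← pow_mul]
    have hBa : (0 : Int) < base ^ a := pow_pos hb0 a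
    have hBm : (0 : Int) < base ^ m := pow_pos hb0 m
    rw [h2a, h2m, show (1 : Int) * base ^ m - 1 + 1 = base ^ m by ring]
    have hdiv : PySem.Int.floordiv x (base ^ a) = S + base ^ m * T := by
      rw [PySem.Int.floordiv_eq_ediv_of_pos hBa, hx, mul_comm (base ^ a) (S + base ^ m * T),
        Int.add_mul_ediv_right Lo _ (by omega), Int.ediv_eq_zero_of_lt hLo1 hLo2]
      ring
    rw [hdiv, PySem.Int.mod_eq_emod_of_pos hBm, Int.add_mul_emod_self_left]
    exact Int.emod_eq_of_lt hS1 hS2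
  -- forward packing decomposition
  have hfwd : (∑ j ∈ Finset.range n, d j * base ^ j) =
      (∑ j ∈ Finset.range i, d j * base ^ j) +
        base ^ i * ((∑ t ∈ Finset.range m, d (i + t) * base ^ t) +
          base ^ m * ∑ t ∈ Finset.range (n - i - m), d (i + m + t) * base ^ t) := by
    have A1 := Finset.sum_range_add (fun j => d j * base ^ j) i (n - i)
    rw [show i + (n - i) = n by omega] at A1
    have A2 := Finset.sum_range_add (fun t => d (i + t) * base ^ (i + t)) m (n - i - m)
    rw [show m + (n - i - m) = n - i by omega] at A2
    have e1 : ∀ t ∈ Finset.range m,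
        d (i + t) * base ^ (i + t) = base ^ i * (d (i + t) * base ^ t) := by
      intro t _
      rw [pow_add]
      ring
    have e2 : ∀ s ∈ Finset.range (n - i - m),
        d (i + (m + s)) * base ^ (i + (m + s)) =
          base ^ i * (base ^ m * (d (i + m + s) * base ^ s)) := by
      intro s _
      rw [show i + (m + s) = i + m + s by omega, pow_add, pow_add]
      ring
    rw [A1, A2, Finset.sum_congr rfl e1, Finset.sum_congr rfl e2]
    simp only [← Finset.mul_sum]
    ring
  -- reversed packing decomposition
  have hrev : (∑ j ∈ Finset.range n, d j * base ^ (n - 1 - j)) =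
      (∑ t ∈ Finset.range (n - i), d (i + t) * base ^ (n - 1 - i - t)) +
        base ^ (n - i) * ((∑ t ∈ Finset.range m, d (i - 1 - t) * base ^ t) +
          base ^ m * ∑ t ∈ Finset.range (i - m), d (i - 1 - m - t) * base ^ t) := by
    have A1 := Finset.sum_range_add (fun j => d j * base ^ (n - 1 - j)) i (n - i)
    rw [show i + (n - i) = n by omega] at A1
    have e0 : ∀ t ∈ Finset.range (n - i),
        d (i + t) * base ^ (n - 1 - (i + t)) = d (i + t) * base ^ (n - 1 - i - t) := by
      intro t ht
      simp only [Finset.mem_range] at ht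
      rw [show n - 1 - (i + t) = n - 1 - i - t by omega]
    have e1 : ∀ j ∈ Finset.range i,
        d j * base ^ (n - 1 - j) = base ^ (n - i) * (d j * base ^ (i - 1 - j)) := by
      intro j hj
      simp only [Finset.mem_range] at hj
      rw [show n - 1 - j = (n - i) + (i - 1 - j) by omega, pow_add]
      ring
    have R1 : (∑ j ∈ Finset.range i, d j * base ^ (i - 1 - j)) =
        ∑ t ∈ Finset.range i, d (i - 1 - t) * base ^ t := by
      rw [← Finset.sum_range_reflect (fun t => d (i - 1 - t) * base ^ t) i]
      refine Finset.sum_congr rfl ?_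
      intro j hj
      simp only [Finset.mem_range] at hj
      rw [show i - 1 - (i - 1 - j) = j by omega]
    have A3 := Finset.sum_range_add (fun t => d (i - 1 - t) * base ^ t) m (i - m)
    rw [show m + (i - m) = i by omega] at A3
    have e2 : ∀ s ∈ Finset.range (i - m),
        d (i - 1 - (m + s)) * base ^ (m + s) = base ^ m * (d (i - 1 - m - s) * base ^ s) := by
      intro s _
      rw [show i - 1 - (m + s) = i - 1 - m - s by omega, pow_add]
      ring
    rw [A1, Finset.sum_congr rfl e0, Finset.sum_congr rfl e1]
    simp only [← Finset.mul_sum]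
    rw [R1, A3, Finset.sum_congr rfl e2]
    simp only [← Finset.mul_sum]
    ring
  -- bounds for the low parts and the extracted windows
  have hLo1 := digits_bound base i d hb0 (fun t ht => hdig t (by omega))
  have hLo2' : 0 ≤ (∑ t ∈ Finset.range (n - i), d (i + t) * base ^ (n - 1 - i - t)) ∧
      (∑ t ∈ Finset.range (n - i), d (i + t) * base ^ (n - 1 - i - t)) < base ^ (n - i) := by
    have R2 : (∑ t ∈ Finset.range (n - i), d (i + t) * base ^ (n - 1 - i - t)) =
        ∑ t ∈ Finset.range (n - i), d (i + (n - i - 1 - t)) * base ^ t := by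
      rw [← Finset.sum_range_reflect (fun t => d (i + (n - i - 1 - t)) * base ^ t) (n - i)]
      refine Finset.sum_congr rfl ?_
      intro t ht
      simp only [Finset.mem_range] at ht
      rw [show n - i - 1 - (n - i - 1 - t) = t by omega, show n - i - 1 - t = n - 1 - i - t by omega]
    rw [R2]
    exact digits_bound base (n - i) (fun t => d (i + (n - i - 1 - t))) hb0
      (fun t ht => hdig _ (by omega))
  have hS1 := digits_bound base m (fun t => d (i + t)) hb0 (fun t ht => hdig _ (by omega))
  have hS2 := digits_bound base m (fun t => d (i - 1 - t)) hb0 (fun t ht => hdig _ (by omega))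
  -- put it together
  unfold condB
  rw [hmi, hc3, hextract _ _ _ _ (n - i) hrev hLo2'.1 hLo2'.2 hS2.1 hS2.2,
    hextract _ _ _ _ i hfwd hLo1.1 hLo1.2 hS1.1 hS1.2, beq_iff_eq]
  constructor
  · intro hS
    exact digits_inj base m (fun t => d (i - 1 - t)) (fun t => d (i + t))
      (fun t ht => hdig _ (by omega)) (fun t ht => hdig _ (by omega)) hS
  · intro h
    refine Finset.sum_congr rfl ?_
    intro t ht
    simp only [Finset.mem_range] at ht
    rw [hd]
    show xs.getD (i - 1 - t) 0 * base ^ t = xs.getD (i + t) 0 * base ^ t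
    rw [h t ht]

-- the two loop conditions agree on every candidate index
lemma condAB (input : List String) (i : Int) (h1 : 1 ≤ i) (h2 : i < (input.length : Int)) :
    condA input i =
      condB ((input.length : ℕ) : Int) ((PySem.Int.bitLength (internSize input) : ℕ) : Int)
        (∑ j ∈ Finset.range input.length,
          (internB input).getD j 0 * ((2 : Int) ^ PySem.Int.bitLength (internSize input)) ^ j)
        (∑ j ∈ Finset.range input.length,
          (internB input).getD j 0 * ((2 : Int) ^ PySem.Int.bitLength (internSize input)) ^ (input.length - 1 - j))
        i := by
  obtain ⟨hlen, htr, hbd⟩ := internB_spec input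
  have hiN : i = ((i.toNat : ℕ) : Int) := by omega
  set iN := i.toNat with hdef
  have hb1 : 1 ≤ iN := by omega
  have hb2 : iN < input.length := by omega
  have hbd' : ∀ v ∈ internB input,
      0 ≤ v ∧ v < (2 : Int) ^ PySem.Int.bitLength (internSize input) := by
    intro v hv
    have hv1 := hbd v hv
    have hv2 := PySem.Int.lt_two_pow_bitLength (internSize input)
    have hv3 : ((internSize input).natAbs : Int) = internSize input := by
      unfold internSize
      simp
    refine ⟨hv1.1, ?_⟩
    calc v < internSize input := hv1.2
      _ = ((internSize input).natAbs : Int) := hv3.symm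
      _ < ((2 ^ PySem.Int.bitLength (internSize input) : ℕ) : Int) := by exact_mod_cast hv2
      _ = (2 : Int) ^ PySem.Int.bitLength (internSize input) := by push_cast; ring
  rw [hiN, Bool.eq_iff_iff, condA_iff input iN hb1 hb2,
    condB_iff (internB input) (PySem.Int.bitLength (internSize input)) hbd' input.length hlen iN hb1 hb2]
  have hget : ∀ (j : ℕ) (hj : j < input.length),
      (internB input).getD j 0 = (internB input)[j]'(by omega) := by
    intro j hj
    exact List.getD_eq_getElem _ _ (by omega)
  constructor
  · intro h t ht
    rw [hget _ (by omega), hget _ (by omega)]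
    exact (htr _ _ (by omega) (by omega) (by omega) (by omega)).mpr (h t ht)
  · intro h t ht
    have := h t ht
    rw [hget _ (by omega), hget _ (by omega)] at this
    exact (htr _ _ (by omega) (by omega) (by omega) (by omega)).mp this

lemma alt_eq (input : List String) :
    mirror_index_py_alt input =
      mirrorLoopB ((internB input).length : Int)
        ((PySem.Int.bitLength (internSize input) : ℕ) : Int)
        ((PySem.List.pyRange 0 ((internB input).length : Int) 1).foldl
          (packStep (internB input) ((PySem.Int.bitLength (internSize input) : ℕ) : Int)
            ((internB input).length : Int)) (0, 0)).1
        ((PySem.List.pyRange 0 ((internB input).length : Int) 1).foldl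
          (packStep (internB input) ((PySem.Int.bitLength (internSize input) : ℕ) : Int)
            ((internB input).length : Int)) (0, 0)).2
        (PySem.List.pyRange 1 ((internB input).length : Int) 1) := rfl

-- ===== VERDICT (by name: the statement is the Claim_ definition above) =====
theorem mirror_index_py_spec : Claim_equal_mirror_index_py := by
  intro input _
  unfold Spec_mirror_index_py
  have hlen : (internB input).length = input.length := (internB_spec input).1
  rw [alt_eq]
  simp only [hlen]
  rw [pack_char (internB input) (PySem.Int.bitLength (internSize input)) input.length
    input.length (le_refl _)]
  by_cases hsmall : input.length < 2
  · unfold mirror_index_py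
    rw [if_pos hsmall,
      PySem.List.pyRange_one_eq_nil (by omega : ((input.length : ℕ) : Int) ≤ 1)]
    rfl
  · unfold mirror_index_py
    rw [if_neg hsmall]
    apply loops_eq
    intro i hi
    rw [PySem.List.mem_pyRange_one] at hi
    exact condAB input i hi.1 hi.2
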